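-- pv_equiv track=rewrite | github.com/Ragnarok-z/OTN_over_EON | CAG.py | _find_free_blocks
-- ===== SOURCE A (Python) =====
-- def _find_free_blocks(fs_usage):
--     """找出连续的可用频谱块"""
--     free_blocks = []
--     current_block = 0
--
--     for fs_available in fs_usage:
--         if not fs_available:  # 空闲
--             current_block += 1
--         else:
--             if current_block > 0:
--                 free_blocks.append(current_block)
--                 current_block = 0
--
--     if current_block > 0:
--         free_blocks.append(current_block)
--
--     return free_blocks
-- ===== SOURCE B (Python) =====
-- from itertools import groupby
--
-- def _find_free_blocks(fs_usage):
--     free_blocks = []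
--     for is_free, g in groupby(fs_usage, key=lambda x: not x):
--         if is_free:
--             free_blocks.append(sum(1 for _ in g))
--     return free_blocks
-- ===== Notes on version B (the rewrite author's own statement) =====
-- stated objective: idiomatic
-- what changed: Replaces the running-counter state machine with an itertools.groupby pass that splits the input into maximal runs by freeness and emits the length of each free run.
import Mathlib
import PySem

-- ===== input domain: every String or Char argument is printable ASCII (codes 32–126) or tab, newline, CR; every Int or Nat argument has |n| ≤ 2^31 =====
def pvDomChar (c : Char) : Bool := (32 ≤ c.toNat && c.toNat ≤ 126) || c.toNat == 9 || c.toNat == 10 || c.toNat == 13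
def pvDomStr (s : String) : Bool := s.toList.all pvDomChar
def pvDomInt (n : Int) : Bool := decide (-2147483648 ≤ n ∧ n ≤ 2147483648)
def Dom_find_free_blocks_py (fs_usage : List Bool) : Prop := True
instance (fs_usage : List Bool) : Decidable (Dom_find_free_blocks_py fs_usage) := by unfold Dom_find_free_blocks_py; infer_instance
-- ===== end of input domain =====

-- B replaces A's running-counter state machine by a group-into-runs pass (itertools.groupby)
-- that emits the length of each free run; objective: idiomatic, same O(n) cost.

-- ===== PORT A =====
-- literal port of A's loop: state = (free_blocks, current_block), then the final flush
def find_free_blocks_py (fs_usage : List Bool) : List Int :=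
  let st := fs_usage.foldl
    (fun (st : List Int × Int) fs_available =>
      if !fs_available then (st.1, st.2 + 1)
      else if st.2 > 0 then (st.1 ++ [st.2], 0) else st)
    ([], 0)
  if st.2 > 0 then st.1 ++ [st.2] else st.1

-- ===== PORT B =====
-- port of itertools.groupby on booleans keyed by (not x): maximal runs of equal freeness
def groupRuns : List Bool → List (List Bool)
  | [] => []
  | x :: xs =>
    match groupRuns xs with
    | (y :: g) :: rest => if x == y then (x :: y :: g) :: rest else [x] :: (y :: g) :: rest
    | gs => [x] :: gs

-- keep the groups whose key (not head) is true, i.e. the free runs, and emit their lengths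
def find_free_blocks_py_alt (fs_usage : List Bool) : List Int :=
  ((groupRuns fs_usage).filter (fun g => !g.headD true)).map (fun g => (g.length : Int))

-- ===== PRECONDITION & SPEC =====
def Spec_find_free_blocks_py (fs_usage : List Bool) (out : List Int) : Prop := out = find_free_blocks_py_alt fs_usage
instance (fs_usage : List Bool) (out : List Int) : Decidable (Spec_find_free_blocks_py fs_usage out) := by unfold Spec_find_free_blocks_py; infer_instance

-- ===== CLAIM (what is proved, stated in full; the proofs are below) =====
def Claim_equal_find_free_blocks_py : Prop := ∀ (fs_usage : List Bool), Dom_find_free_blocks_py fs_usage → Spec_find_free_blocks_py fs_usage (find_free_blocks_py fs_usage)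

-- ===== LEMMAS AND PROOFS =====

-- value of A's loop continued from state (free_blocks, current_block), as a recursive function
def specAuxI : List Bool → Int → List Int
  | [], c => if c > 0 then [c] else []
  | false :: xs, c => specAuxI xs (c + 1)
  | true :: xs, c => if c > 0 then c :: specAuxI xs 0 else specAuxI xs c

theorem foldl_specAuxI (xs : List Bool) : ∀ (acc : List Int) (c : Int),
    (let st := xs.foldl
      (fun (st : List Int × Int) fs_available =>
        if !fs_available then (st.1, st.2 + 1)
        else if st.2 > 0 then (st.1 ++ [st.2], 0) else st)
      (acc, c);
     if st.2 > 0 then st.1 ++ [st.2] else st.1) = acc ++ specAuxI xs c := by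
  induction xs with
  | nil => intro acc c; by_cases hc : c > 0 <;> simp [specAuxI, hc]
  | cons x xs ih =>
    intro acc c
    cases x with
    | false => simpa [specAuxI] using ih acc (c + 1)
    | true =>
      by_cases hc : c > 0
      · simp only [List.foldl_cons, specAuxI, Bool.not_true, Bool.false_eq_true, if_false,
          if_pos hc]
        rw [ih (acc ++ [c]) 0]
        simp
      · simp only [List.foldl_cons, specAuxI, Bool.not_true, Bool.false_eq_true, if_false,
          if_neg hc]
        exact ih acc c

theorem groupRuns_cons (x : Bool) (xs : List Bool) :
    groupRuns (x :: xs) =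
      match groupRuns xs with
      | (y :: g) :: rest => if x == y then (x :: y :: g) :: rest else [x] :: (y :: g) :: rest
      | gs => [x] :: gs := rfl

theorem shape_groupRuns (x : Bool) (xs : List Bool) :
    ∃ g rest, groupRuns (x :: xs) = (x :: g) :: rest := by
  cases h : groupRuns xs with
  | nil => exact ⟨[], [], by rw [groupRuns_cons, h]⟩
  | cons g' rest' =>
    cases g' with
    | nil => exact ⟨[], [] :: rest', by rw [groupRuns_cons, h]⟩
    | cons y g =>
      by_cases hxy : x = y
      · exact ⟨y :: g, rest', by rw [groupRuns_cons, h]; simp [hxy]⟩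
      · exact ⟨[], (y :: g) :: rest', by rw [groupRuns_cons, h]; simp [hxy]⟩

-- dropping a leading occupied slot does not change the free runs' lengths
theorem alt_true_cons (xs : List Bool) :
    find_free_blocks_py_alt (true :: xs) = find_free_blocks_py_alt xs := by
  cases xs with
  | nil => rfl
  | cons y ys =>
    obtain ⟨g, rest, h⟩ := shape_groupRuns y ys
    cases y with
    | true =>
      have h2 : groupRuns (true :: true :: ys) = (true :: true :: g) :: rest := by
        rw [groupRuns_cons, h]; simp
      simp [find_free_blocks_py_alt, h2, h]
    | false =>
      have h2 : groupRuns (true :: false :: ys) = [true] :: (false :: g) :: rest := by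
        rw [groupRuns_cons, h]; simp
      simp [find_free_blocks_py_alt, h2, h]

-- a leading block of free slots forms its own first group when the rest starts occupied (or is empty)
theorem groupRuns_replicate_false (c : Nat) (xs : List Bool)
    (h : xs = [] ∨ xs.head? = some true) :
    groupRuns (List.replicate (c + 1) false ++ xs) =
      List.replicate (c + 1) false :: groupRuns xs := by
  induction c with
  | zero =>
    rcases h with h | h
    · subst h; rfl
    · cases xs with
      | nil => simp at h
      | cons y ys =>
        simp at h; subst h
        obtain ⟨g, rest, hg⟩ := shape_groupRuns true ys
        rw [List.replicate_one, List.singleton_append, groupRuns_cons, hg]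
        simp
  | succ k ih =>
    have h2 : List.replicate (k + 2) false ++ xs = false :: (List.replicate (k + 1) false ++ xs) := by
      simp [List.replicate_succ]
    rw [h2, groupRuns_cons, ih]
    simp [List.replicate_succ]

theorem specAuxI_alt (xs : List Bool) : ∀ (c : Nat),
    specAuxI xs (c : Int) = find_free_blocks_py_alt (List.replicate c false ++ xs) := by
  induction xs with
  | nil =>
    intro c
    cases c with
    | zero => rfl
    | succ k =>
      rw [specAuxI, if_pos (by positivity)]
      have hg := groupRuns_replicate_false k [] (Or.inl rfl)
      simp only [List.append_nil] at hg
      simp only [find_free_blocks_py_alt, List.append_nil]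
      rw [hg]
      simp [groupRuns, List.replicate_succ]
  | cons x xs ih =>
    intro c
    cases x with
    | false =>
      rw [specAuxI]
      have hc : (c : Int) + 1 = ((c + 1 : Nat) : Int) := by push_cast; ring
      rw [hc, ih (c + 1)]
      congr 1
      simp [List.replicate_succ']
    | true =>
      cases c with
      | zero => simpa [specAuxI, alt_true_cons] using ih 0
      | succ k =>
        rw [specAuxI, if_pos (by positivity)]
        have hg := groupRuns_replicate_false k (true :: xs) (Or.inr rfl)
        have h2 : find_free_blocks_py_alt (List.replicate (k + 1) false ++ true :: xs)
            = ((k + 1 : Nat) : Int) :: find_free_blocks_py_alt (true :: xs) := by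
          simp only [find_free_blocks_py_alt]
          rw [hg]
          simp [List.replicate_succ]
        rw [h2, alt_true_cons]
        have h0 := ih 0
        simp only [List.replicate_zero, List.nil_append, Nat.cast_zero] at h0
        rw [h0]

-- ===== VERDICT (by name: the statement is the Claim_ definition above) =====
theorem find_free_blocks_py_spec : Claim_equal_find_free_blocks_py := by
  intro fs_usage _
  unfold Spec_find_free_blocks_py find_free_blocks_py
  rw [foldl_specAuxI fs_usage [] 0]
  have h := specAuxI_alt fs_usage 0
  simp only [List.replicate_zero, List.nil_append, Nat.cast_zero] at h
  simp [h]
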